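-- pv_equiv track=rewrite | github.com/kmk142789/kmk142789 | tools/pkscript_to_address.py | _looks_like_bech32
-- ===== SOURCE A (Python) =====
-- _BECH32_ALPHABET = "qpzry9x8gf2tvdw0s3jn54khce6mua7l"
--
-- _BECH32_HRPS = {"bc", "tb", "bcrt"}
--
-- def _looks_like_bech32(value: str) -> bool:
--     cleaned = value.lower().replace("-", "")
--
--     if not cleaned or "1" not in cleaned:
--         return False
--
--     hrp, _, data = cleaned.partition("1")
--
--     if not hrp or hrp not in _BECH32_HRPS:
--         return False
--
--     if len(data) < 6:
--         return False
--
--     return all(ch in _BECH32_ALPHABET for ch in data)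
-- ===== SOURCE B (Python) =====
-- import re
--
-- _BECH32_RE = re.compile(r"(bc|tb|bcrt)1[qpzry9x8gf2tvdw0s3jn54khce6mua7l]{6,}\Z")
--
-- def _looks_like_bech32(value: str) -> bool:
--     cleaned = value.lower().replace("-", "")
--     return bool(_BECH32_RE.match(cleaned))
-- ===== Notes on version B (the rewrite author's own statement) =====
-- stated objective: idiomatic
-- what changed: Replaces the partition-at-first-'1' / HRP set-membership / len guard / all()-scan pipeline with a single precompiled anchored regex match on the cleaned string.
import Mathlib
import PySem

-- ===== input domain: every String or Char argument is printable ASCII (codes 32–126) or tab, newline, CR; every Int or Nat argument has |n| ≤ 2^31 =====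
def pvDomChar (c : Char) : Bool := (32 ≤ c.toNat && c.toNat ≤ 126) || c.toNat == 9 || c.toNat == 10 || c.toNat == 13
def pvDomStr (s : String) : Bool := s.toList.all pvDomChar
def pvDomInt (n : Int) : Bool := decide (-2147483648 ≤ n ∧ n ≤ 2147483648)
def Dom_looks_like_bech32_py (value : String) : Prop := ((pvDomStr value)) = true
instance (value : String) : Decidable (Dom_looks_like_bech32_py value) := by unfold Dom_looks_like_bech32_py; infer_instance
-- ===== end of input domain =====

-- B replaces A's partition/membership/all() pipeline by one anchored regex match; objective: idiomatic.

-- ===== PORT A =====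
def pvAlphabet : List Char := "qpzry9x8gf2tvdw0s3jn54khce6mua7l".toList

-- the module-level set literal _BECH32_HRPS = {"bc", "tb", "bcrt"}
def pvHrps : PySem.Set (List Char) := PySem.Set.ofList [['b','c'], ['t','b'], ['b','c','r','t']]

def looks_like_bech32_py (value : String) : Bool :=
  let cleaned : List Char := PySem.Chars.replace (PySem.Chars.lower value.toList) ['-'] []
  if cleaned.isEmpty || !(PySem.Chars.isIn ['1'] cleaned) then false
  else
    -- cleaned.partition("1"), ported by hand: split at the FIRST '1' (exact here since
    -- the branch above guarantees '1' ∈ cleaned, so the separator is found)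
    let hrp := cleaned.takeWhile (fun c => !(c == '1'))
    let data := (cleaned.dropWhile (fun c => !(c == '1'))).drop 1
    if hrp.isEmpty || !(pvHrps.contains hrp) then false
    else if data.length < 6 then false
    else data.all (fun ch => PySem.Chars.isIn [ch] pvAlphabet)

-- ===== PORT B =====
-- Source B matches the compiled anchored regex r"(bc|tb|bcrt)1[qpzry9x8gf2tvdw0s3jn54khce6mua7l]{6,}\Z"
-- against cleaned.  Ported by hand, following the regex's structure: the alternation tries each
-- branch (the engine backtracks between them, so order is immaterial for whether a match exists),
-- '1' after the group, then the character class repeated at least 6 times up to the end anchor.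
-- the regex's character class, as written in Source B's pattern
def pvBech32Class : List Char := "qpzry9x8gf2tvdw0s3jn54khce6mua7l".toList

def pvClassTail (cs : List Char) : Bool :=
  -- [class]{6,}\Z : at least six characters, every one in the class, nothing after
  6 ≤ cs.length && cs.all (fun c => c ∈ pvBech32Class)

def looks_like_bech32_py_alt (value : String) : Bool :=
  let cleaned : List Char := PySem.Chars.replace (PySem.Chars.lower value.toList) ['-'] []
  [['b','c'], ['t','b'], ['b','c','r','t']].any (fun p =>
    (p ++ ['1']).isPrefixOf cleaned && pvClassTail (cleaned.drop (p.length + 1)))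

-- ===== PRECONDITION & SPEC =====
def Spec_looks_like_bech32_py (value : String) (out : Bool) : Prop := out = looks_like_bech32_py_alt value
instance (value : String) (out : Bool) : Decidable (Spec_looks_like_bech32_py value out) := by unfold Spec_looks_like_bech32_py; infer_instance

-- ===== CLAIM (what is proved, stated in full; the proofs are below) =====
def Claim_equal_looks_like_bech32_py : Prop := ∀ (value : String), Dom_looks_like_bech32_py value → Spec_looks_like_bech32_py value (looks_like_bech32_py value)

-- ===== LEMMAS AND PROOFS =====

lemma pv_isIn_iff (sub s : List Char) : PySem.Chars.isIn sub s = true ↔ sub <:+: s := by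
  have h := PySem.Chars.findFrom_natCast_eq_neg_one_iff s sub 0 (Nat.zero_le _)
  simp at h
  simp only [PySem.Chars.isIn, bne_iff_ne]
  exact not_iff_not.mpr h |>.trans not_not

lemma pv_isIn_singleton (c : Char) (s : List Char) :
    PySem.Chars.isIn [c] s = true ↔ c ∈ s := by
  rw [pv_isIn_iff, List.singleton_infix_iff]

-- takeWhile/dropWhile over an explicit "p ++ '1' :: t" split
lemma pv_split (p t : List Char) (hp : '1' ∉ p) :
    (p ++ '1' :: t).takeWhile (fun c => !(c == '1')) = p ∧
    (p ++ '1' :: t).dropWhile (fun c => !(c == '1')) = '1' :: t := by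
  induction p with
  | nil => simp
  | cons a p ih =>
    have ha : a ≠ '1' := fun h => hp (by simp [h])
    have := ih (fun h => hp (List.mem_cons_of_mem _ h))
    simp [ha, this.1, this.2]

-- if '1' ∈ cs then cs splits as hrp ++ '1' :: data with hrp = takeWhile
lemma pv_mem_split (cs : List Char) (h : '1' ∈ cs) :
    cs = cs.takeWhile (fun c => !(c == '1')) ++
      '1' :: ((cs.dropWhile (fun c => !(c == '1'))).drop 1) := by
  have hne : cs.dropWhile (fun c => !(c == '1')) ≠ [] := by
    intro hd
    have := List.takeWhile_append_dropWhile (p := fun c => !(c == '1')) (l := cs)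
    rw [hd, List.append_nil] at this
    exact absurd (List.mem_takeWhile_imp (this ▸ h)) (by simp)
  obtain ⟨a, l, hd⟩ := List.exists_cons_of_ne_nil hne
  have ha : a = '1' := by
    have := List.head_dropWhile_not (fun c => !(c == '1')) hne
    simpa [hd] using this
  conv_lhs => rw [← List.takeWhile_append_dropWhile (p := fun c => !(c == '1')) (l := cs)]
  rw [hd, ha]
  simp

lemma pv_core (cs : List Char) :
    (if cs.isEmpty || !(PySem.Chars.isIn ['1'] cs) then false
     else
       let hrp := cs.takeWhile (fun c => !(c == '1'))
       let data := (cs.dropWhile (fun c => !(c == '1'))).drop 1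
       if hrp.isEmpty || !(pvHrps.contains hrp) then false
       else if data.length < 6 then false
       else data.all (fun ch => PySem.Chars.isIn [ch] pvAlphabet))
    = [['b','c'], ['t','b'], ['b','c','r','t']].any (fun p =>
        (p ++ ['1']).isPrefixOf cs && pvClassTail (cs.drop (p.length + 1))) := by
  rw [Bool.eq_iff_iff]
  constructor
  · intro hA
    simp only [Bool.or_eq_true, Bool.not_eq_true', List.isEmpty_iff] at hA
    by_cases h1 : PySem.Chars.isIn ['1'] cs = true
    swap
    · rw [if_pos (Or.inr (by simpa using h1))] at hA; exact absurd hA (by simp)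
    have hmem : '1' ∈ cs := (pv_isIn_singleton _ _).mp h1
    rw [if_neg (by simp [h1, List.ne_nil_of_mem hmem])] at hA
    obtain ⟨hrp, data, hcs, hhrp, hdata⟩ :
        ∃ h d, cs = h ++ '1' :: d ∧ h = cs.takeWhile (fun c => !(c == '1')) ∧
          d = (cs.dropWhile (fun c => !(c == '1'))).drop 1 :=
      ⟨_, _, pv_mem_split cs hmem, rfl, rfl⟩
    rw [← hhrp, ← hdata] at hA
    clear hhrp hdata
    by_cases hc : (hrp = [] ∨ pvHrps.contains hrp = false)
    · rw [if_pos (by simpa using hc)] at hA; exact absurd hA (by simp)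
    rw [if_neg (by simpa using hc)] at hA
    by_cases hl : data.length < 6
    · rw [if_pos hl] at hA; exact absurd hA (by simp)
    rw [if_neg hl] at hA
    rw [not_or] at hc
    have hmem3 : hrp ∈ [['b','c'], ['t','b'], ['b','c','r','t']] := by
      have h2 : hrp ∈ pvHrps := by simpa using hc.2
      simpa [pvHrps, PySem.Set.mem_ofList] using h2
    rw [List.any_eq_true]
    refine ⟨hrp, hmem3, ?_⟩
    have hpref : (hrp ++ ['1']).isPrefixOf cs = true := by
      rw [List.isPrefixOf_iff_prefix, hcs]
      exact ⟨data, by simp⟩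
    have hdrop : cs.drop (hrp.length + 1) = data := by
      rw [hcs]; simp [List.drop_append]
    have htail : pvClassTail data = true := by
      simp only [pvClassTail, Bool.and_eq_true, decide_eq_true_eq, List.all_eq_true]
      refine ⟨by omega, fun c hcm => ?_⟩
      simpa using (pv_isIn_singleton _ _).mp (List.all_eq_true.mp hA c hcm)
    rw [hpref, hdrop, htail]; rfl
  · intro hB
    rw [List.any_eq_true] at hB
    obtain ⟨p, hp3, hpb⟩ := hB
    rw [Bool.and_eq_true, List.isPrefixOf_iff_prefix] at hpb
    obtain ⟨⟨t, ht⟩, htail⟩ := hpb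
    have hp1 : '1' ∉ p := by
      fin_cases hp3 <;> decide
    have hcs : cs = p ++ '1' :: t := by rw [← ht]; simp
    have hsp := pv_split p t hp1
    have hmem : '1' ∈ cs := by rw [hcs]; simp
    have hne : cs ≠ [] := List.ne_nil_of_mem hmem
    have h1 : PySem.Chars.isIn ['1'] cs = true := (pv_isIn_singleton _ _).mpr hmem
    have hhrp : cs.takeWhile (fun c => !(c == '1')) = p := by rw [hcs]; exact hsp.1
    have hdata : (cs.dropWhile (fun c => !(c == '1'))).drop 1 = t := by
      rw [hcs, hsp.2]; simp
    have hdropt : cs.drop (p.length + 1) = t := by rw [hcs]; simp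
    rw [hdropt] at htail
    simp only [pvClassTail, Bool.and_eq_true, decide_eq_true_eq, List.all_eq_true] at htail
    have hc : pvHrps.contains p = true := by
      rw [PySem.Set.contains_iff, pvHrps, PySem.Set.mem_ofList]
      exact hp3
    have hpne : p ≠ [] := by fin_cases hp3 <;> decide
    rw [if_neg (by simp [h1, hne]), hhrp, hdata,
        if_neg (by simp [hpne, (PySem.Set.contains_iff _ _).mp hc]), if_neg (Nat.not_lt.mpr htail.1), List.all_eq_true]
    intro c hcmem
    exact (pv_isIn_singleton _ _).mpr (htail.2 c hcmem)

-- ===== VERDICT (by name: the statement is the Claim_ definition above) =====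
theorem looks_like_bech32_py_spec : Claim_equal_looks_like_bech32_py := by
  intro value _
  unfold Spec_looks_like_bech32_py looks_like_bech32_py looks_like_bech32_py_alt
  exact pv_core _
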